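-- pv_equiv track=rewrite | github.com/marhcouto/feup-cpd-proj | assign1/src/main.py | OnMultLine
-- ===== SOURCE A (Python) =====
-- def OnMultLine(n):
--
--     m1 = list()
--     m2 = list()
--     res = list()
--
--     for i in range(0, n):
--         m1.append([1] * n)
--         m2.append([i + 1] * n)
--         res.append([0] * n)
--
--     for i in range(0, n):
--         for k in range(0, n):
--             for j in range(0, n):
--                 res[i][j] += m1[i][k] * m2[k][j]
--
--     return res
-- ===== SOURCE B (Python) =====
-- def OnMultLine(n):
--     # every cell of the product equals n*(n+1)//2
--     c = n * (n + 1) // 2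
--     return [[c] * n for _ in range(n)]
-- ===== Notes on version B (the rewrite author's own statement) =====
-- stated objective: faster
-- what changed: Replaces the O(n^3) triple-loop multiplication of the two constant matrices by a closed form: every cell equals n(n+1)/2, so B just fills an n x n matrix with that constant.
import Mathlib
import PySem

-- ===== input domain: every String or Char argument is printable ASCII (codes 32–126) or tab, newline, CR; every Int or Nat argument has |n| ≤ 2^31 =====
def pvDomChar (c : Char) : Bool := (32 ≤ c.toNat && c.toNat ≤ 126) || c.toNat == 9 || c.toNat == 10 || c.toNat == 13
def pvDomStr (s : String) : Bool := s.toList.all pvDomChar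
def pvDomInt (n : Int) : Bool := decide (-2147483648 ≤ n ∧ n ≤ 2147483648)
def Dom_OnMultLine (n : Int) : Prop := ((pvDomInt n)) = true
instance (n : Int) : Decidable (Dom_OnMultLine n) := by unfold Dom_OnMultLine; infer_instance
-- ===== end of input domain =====

-- B replaces A's triple-loop product of the two constant matrices by a closed form: every cell is n(n+1)/2 (objective: faster).

-- ===== PORT A =====
def OnMultLine (n : Int) : List (List Int) :=
  let m1 := (PySem.List.pyRange 0 n 1).foldl (fun a _i => a ++ [PySem.List.pyRepeat [(1 : Int)] n]) []
  let m2 := (PySem.List.pyRange 0 n 1).foldl (fun a i => a ++ [PySem.List.pyRepeat [i + 1] n]) []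
  let res := (PySem.List.pyRange 0 n 1).foldl (fun a _i => a ++ [PySem.List.pyRepeat [(0 : Int)] n]) []
  (PySem.List.pyRange 0 n 1).foldl (fun r i =>
    (PySem.List.pyRange 0 n 1).foldl (fun r k =>
      (PySem.List.pyRange 0 n 1).foldl (fun r j =>
        PySem.List.pySetD r i
          (PySem.List.pySetD (PySem.List.pyGetD r i []) j
            (PySem.List.pyGetD (PySem.List.pyGetD r i []) j 0
              + PySem.List.pyGetD (PySem.List.pyGetD m1 i []) k 0
                * PySem.List.pyGetD (PySem.List.pyGetD m2 k []) j 0))) r) r) res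

-- ===== PORT B =====
def OnMultLine_alt (n : Int) : List (List Int) :=
  let c := PySem.Int.floordiv (n * (n + 1)) 2
  (PySem.List.pyRange 0 n 1).map (fun _ => PySem.List.pyRepeat [c] n)

-- ===== PRECONDITION & SPEC =====
def Spec_OnMultLine (n : Int) (out : List (List Int)) : Prop := out = OnMultLine_alt n
instance (n : Int) (out : List (List Int)) : Decidable (Spec_OnMultLine n out) := by unfold Spec_OnMultLine; infer_instance

-- ===== CLAIM (what is proved, stated in full; the proofs are below) =====
def Claim_equal_OnMultLine : Prop := ∀ (n : Int), Dom_OnMultLine n → Spec_OnMultLine n (OnMultLine n)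

-- ===== LEMMAS AND PROOFS =====

-- the constant n(n+1)/2 as an Int, for a Nat-sized matrix
def sInt (m : Nat) : Int := ((m * (m + 1) / 2 : Nat) : Int)

theorem sInt_succ (m : Nat) : sInt (m + 1) = sInt m + ((m : Int) + 1) := by
  unfold sInt
  have h : (m + 1) * (m + 1 + 1) = m * (m + 1) + 2 * (m + 1) := by ring
  omega

theorem foldl_append_singleton {α β : Type} (f : α → β) :
    ∀ (l : List α) (acc : List β),
      l.foldl (fun a i => a ++ [f i]) acc = acc ++ l.map f := by
  intro l
  induction l with
  | nil => intro acc; simp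
  | cons x xs ih => intro acc; simp [List.foldl, ih]

theorem set_at_len {α : Type} (xs ys : List α) (y c : α) (m : Nat) (h : xs.length = m) :
    (xs ++ y :: ys).set m c = xs ++ c :: ys := by
  subst h; simp

theorem getD_append_of_len {α : Type} (xs ys : List α) (d : α) (m : Nat) (h : xs.length = m) :
    (xs ++ ys).getD m d = ys.getD 0 d := by
  subst h
  simp [List.getD_eq_getElem?_getD, List.getElem?_append_right (le_refl xs.length)]

theorem getD_set_self {α : Type} (r : List α) (i : Nat) (x d : α) (h : i < r.length) :
    (r.set i x).getD i d = x := by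
  simp [List.getD_eq_getElem?_getD, h]

theorem set_getD_self {α : Type} (r : List α) (i : Nat) (d : α) (h : i < r.length) :
    r.set i (r.getD i d) = r := by
  rw [List.getD_eq_getElem?_getD, List.getElem?_eq_getElem h]
  exact List.set_getElem_self h

-- j-loop: adding v to the first m cells of row i
theorem jloop (i : Nat) (v : Int) :
    ∀ (m : Nat) (r : List (List Int)), i < r.length → m ≤ (r.getD i []).length →
      (List.range m).foldl
        (fun r j => r.set i ((r.getD i []).set j ((r.getD i []).getD j 0 + v))) r
      = r.set i (((r.getD i []).take m).map (fun x => x + v) ++ (r.getD i []).drop m) := by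
  intro m
  induction m with
  | zero =>
      intro r hi _
      rw [List.range_zero]
      simp only [List.foldl_nil, List.take_zero, List.map_nil, List.drop_zero, List.nil_append]
      exact (set_getD_self r i [] hi).symm
  | succ m ih =>
      intro r hi hm
      have hm' : m ≤ (r.getD i []).length := Nat.le_of_succ_le hm
      have hmlt : m < (r.getD i []).length := hm
      rw [List.range_succ, List.foldl_append, ih r hi hm']
      set row := r.getD i [] with hrow
      have hq : (r.set i ((row.take m).map (fun x => x + v) ++ row.drop m)).getD i []
          = (row.take m).map (fun x => x + v) ++ row.drop m := getD_set_self r i _ [] hi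
      simp only [List.foldl_cons, List.foldl_nil, hq, List.set_set]
      have hlen : ((row.take m).map (fun x => x + v)).length = m := by
        simp [List.length_take, Nat.min_eq_left hm']
      have hdrop : row.drop m = row.getD m 0 :: row.drop (m + 1) := by
        rw [List.getD_eq_getElem?_getD, List.getElem?_eq_getElem hmlt]
        exact List.drop_eq_getElem_cons hmlt
      rw [hdrop, getD_append_of_len _ _ _ _ hlen, List.getD_cons_zero,
        set_at_len _ _ _ _ _ hlen]
      congr 1
      rw [List.getD_eq_getElem?_getD, List.getElem?_eq_getElem hmlt, List.take_add_one]
      rw [List.getElem?_eq_getElem hmlt]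
      simp only [Option.getD_some, Option.toList_some, List.map_append, List.map_cons,
        List.map_nil, List.append_assoc, List.singleton_append]

-- k-loop: row i accumulates the sum 1 + 2 + … + m = sInt m
theorem kloop (N i : Nat) (hiN : i < N) :
    ∀ (m : Nat) (r : List (List Int)), r.length = N → (r.getD i []).length = N →
      (List.range m).foldl
        (fun r k => (List.range N).foldl
          (fun r j => r.set i ((r.getD i []).set j ((r.getD i []).getD j 0 + ((k : Int) + 1)))) r) r
      = r.set i ((r.getD i []).map (fun x => x + sInt m)) := by
  intro m
  induction m with
  | zero =>
      intro r hr _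
      have h0 : (fun x : Int => x + sInt 0) = id := by funext x; simp [sInt]
      rw [List.range_zero]
      simp only [List.foldl_nil, h0, List.map_id]
      exact (set_getD_self r i [] (hr ▸ hiN)).symm
  | succ m ih =>
      intro r hr hrow
      rw [List.range_succ, List.foldl_append, ih r hr hrow]
      set row := r.getD i [] with hrowdef
      have hi : i < r.length := hr ▸ hiN
      have hq : (r.set i (row.map (fun x => x + sInt m))).getD i []
          = row.map (fun x => x + sInt m) := getD_set_self r i _ [] hi
      have hi' : i < (r.set i (row.map (fun x => x + sInt m))).length := by simpa using hi
      have hlen : N ≤ ((r.set i (row.map (fun x => x + sInt m))).getD i []).length := by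
        rw [hq]; simp only [List.length_map]; exact le_of_eq hrow.symm
      simp only [List.foldl_cons, List.foldl_nil]
      rw [jloop i ((m : Int) + 1) N _ hi' hlen, hq, List.set_set]
      have htake : (row.map (fun x => x + sInt m)).take N = row.map (fun x => x + sInt m) := by
        apply List.take_of_length_le; simp only [List.length_map]; exact le_of_eq hrow
      have hdrop : (row.map (fun x => x + sInt m)).drop N = [] := by
        apply List.drop_eq_nil_of_le; simp only [List.length_map]; exact le_of_eq hrow
      rw [htake, hdrop, List.append_nil, List.map_map]
      congr 1
      apply List.map_congr_left
      intro x _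
      simp only [Function.comp_apply, sInt_succ]
      ring

-- i-loop on the initial all-zero matrix: the first m rows become constant sInt N
theorem iloop (N : Nat) :
    ∀ (m : Nat), m ≤ N →
      (List.range m).foldl
        (fun r i => (List.range N).foldl
          (fun r k => (List.range N).foldl
            (fun r j => r.set i ((r.getD i []).set j ((r.getD i []).getD j 0 + ((k : Int) + 1)))) r) r)
        (List.replicate N (List.replicate N (0 : Int)))
      = List.replicate m (List.replicate N (sInt N))
        ++ List.replicate (N - m) (List.replicate N (0 : Int)) := by
  intro m
  induction m with
  | zero => intro _; simp
  | succ m ih =>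
      intro hm
      have hm' : m ≤ N := Nat.le_of_succ_le hm
      have hmlt : m < N := hm
      rw [List.range_succ, List.foldl_append, ih hm']
      set A := List.replicate N (sInt N) with hA
      set q := List.replicate m A ++ List.replicate (N - m) (List.replicate N (0 : Int)) with hqdef
      have hqlen : q.length = N := by rw [hqdef]; simp; omega
      have hrep : List.replicate (N - m) (List.replicate N (0 : Int))
          = List.replicate N (0 : Int) :: List.replicate (N - m - 1) (List.replicate N (0 : Int)) := by
        have h : N - m = (N - m - 1) + 1 := by omega
        conv_lhs => rw [h, List.replicate_succ]
      have hlm : (List.replicate m A).length = m := List.length_replicate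
      have hrow : q.getD m [] = List.replicate N (0 : Int) := by
        rw [hqdef, hrep, getD_append_of_len _ _ _ _ hlm, List.getD_cons_zero]
      have hrowlen : (q.getD m []).length = N := by rw [hrow]; simp
      simp only [List.foldl_cons, List.foldl_nil]
      rw [kloop N m hmlt N q hqlen hrowlen, hrow]
      have hmap : (List.replicate N (0 : Int)).map (fun x => x + sInt N) = A := by
        rw [hA, List.map_replicate]; simp
      rw [hmap, hqdef, hrep, set_at_len _ _ _ _ _ hlm]
      rw [List.replicate_succ']
      have h2 : N - (m + 1) = N - m - 1 := by omega
      rw [h2, List.append_assoc, List.singleton_append]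

theorem fdiv_gauss (N : Nat) :
    ((N : Int) * ((N : Int) + 1)).fdiv 2 = sInt N := by
  have h1 : ((N : Int) * ((N : Int) + 1)) = ((N * (N + 1) : Nat) : Int) := by push_cast; ring
  rw [h1, Int.fdiv_eq_ediv]
  unfold sInt
  simp

theorem OnMultLine_eq (n : Int) : OnMultLine n = OnMultLine_alt n := by
  unfold OnMultLine OnMultLine_alt
  rcases (by omega : 0 ≤ n ∨ n < 0) with hn | hn
  · obtain ⟨N, rfl⟩ := Int.eq_ofNat_of_zero_le hn
    rw [PySem.List.pyRange_zero_natCast]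
    simp only [List.foldl_map, PySem.List.pyRepeat_singleton, Int.toNat_natCast,
      foldl_append_singleton, List.nil_append, List.map_map, Function.comp_def,
      PySem.List.pySetD_natCast, PySem.List.pyGetD_natCast, PySem.Int.floordiv,
      fdiv_gauss, List.map_const', List.length_range]
    refine Eq.trans (PySem.List.foldl_congr_mem _ _
      (fun r i => (List.range N).foldl
        (fun r k => (List.range N).foldl
          (fun r j => r.set i ((r.getD i []).set j ((r.getD i []).getD j 0 + ((k : Int) + 1)))) r) r)
      _ ?_) ?_
    · intro r i hi
      refine PySem.List.foldl_congr_mem _ _ _ _ ?_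
      intro r' k hk
      refine PySem.List.foldl_congr_mem _ _ _ _ ?_
      intro r'' j hj
      have hiN := List.mem_range.mp hi
      have hkN := List.mem_range.mp hk
      have hjN := List.mem_range.mp hj
      rw [PySem.List.getD_map_range _ _ _ _ hkN, List.getD_replicate _ hiN,
        List.getD_replicate _ hkN, List.getD_replicate _ hjN, one_mul]
    · rw [iloop N N le_rfl]
      simp
  · rw [PySem.List.pyRange_one_eq_nil (le_of_lt hn)]
    simp

-- ===== VERDICT (by name: the statement is the Claim_ definition above) =====
theorem OnMultLine_spec : Claim_equal_OnMultLine := by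
  intro n _
  exact OnMultLine_eq n
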